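-- pv_equiv track=rewrite | github.com/eliotte0106/CSC1301 | HW05.py | classRoster
-- ===== SOURCE A (Python) =====
-- def classRoster(students):
--     if len(students) < 0:
--         return
--
--     result = dict()
--     val = list(students.values())
--     key = list(students.keys())
--
--     for v in val:
--         for sub in v:
--             result[sub] = []
--
--     for i in range(len(students)):
--         for x in result:
--             if x in val[i]:
--                 result[x].append(key[i])
--
--     for x in result:
--         result[x].sort()
--
--     return result
-- ===== SOURCE B (Python) =====
-- def classRoster(students):
--     result = {}
--     for student, classes in students.items():
--         for c in dict.fromkeys(classes):
--             result.setdefault(c, []).append(student)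
--     for c in result:
--         result[c].sort()
--     return result
-- ===== Notes on version B (the rewrite author's own statement) =====
-- stated objective: faster
-- what changed: A initialises every class bucket, then for each student re-scans ALL classes in the dict (testing membership of each class in that student's list); B makes one pass over the students, appending each student only to the classes they actually list (deduplicated), then sorts each bucket.
import Mathlib
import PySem

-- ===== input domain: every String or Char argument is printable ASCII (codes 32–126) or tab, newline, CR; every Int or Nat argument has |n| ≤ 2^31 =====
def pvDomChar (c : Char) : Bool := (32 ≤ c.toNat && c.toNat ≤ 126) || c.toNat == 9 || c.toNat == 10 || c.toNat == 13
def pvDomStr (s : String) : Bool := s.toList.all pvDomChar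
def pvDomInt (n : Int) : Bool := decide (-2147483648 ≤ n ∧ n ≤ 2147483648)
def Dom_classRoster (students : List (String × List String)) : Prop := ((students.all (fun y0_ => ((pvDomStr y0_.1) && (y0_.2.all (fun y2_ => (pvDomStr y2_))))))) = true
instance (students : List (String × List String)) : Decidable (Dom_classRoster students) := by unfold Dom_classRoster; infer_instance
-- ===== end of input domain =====

-- B replaces A's pass over ALL classes for EVERY student (plus an index-driven re-scan of the whole
-- dict per student) by a single pass that appends each student only to the classes they list;
-- objective: faster (asymptotic).

-- ===== PORT A =====
-- 'if len(students) < 0: return' is dead code (len is never negative), so it is omitted.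
def classRoster (students : List (String × List String)) : List (String × List String) :=
  let val := students.map Prod.snd
  let key := students.map Prod.fst
  let result : PySem.Dict String (List String) :=
    val.foldl (fun r v => v.foldl (fun r sub => r.insert sub []) r) PySem.Dict.empty
  let result :=
    (PySem.List.pyRange 0 (PySem.List.len students)).foldl
      (fun r i =>
        r.keys.foldl
          (fun r2 x =>
            if (PySem.List.pyGetD val i []).contains x then
              r2.modify x [] (fun l => l ++ [PySem.List.pyGetD key i ""])
            else r2) r) result
  let result :=
    result.keys.foldl (fun r x => r.modify x [] (fun l => PySem.List.sorted l id)) result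
  result.items

-- ===== PORT B =====
def classRoster_alt (students : List (String × List String)) : List (String × List String) :=
  let result : PySem.Dict String (List String) :=
    students.foldl
      (fun r p =>
        (PySem.List.dedup p.2).foldl (fun r c => r.modify c [] (fun l => l ++ [p.1])) r)
      PySem.Dict.empty
  let result :=
    result.keys.foldl (fun r c => r.modify c [] (fun l => PySem.List.sorted l id)) result
  result.items

-- ===== PRECONDITION & SPEC =====
-- The Python argument is a DICT, whose keys are necessarily distinct; a list encoding with
-- duplicate student names has no faithful dict counterpart, so Pre_ excludes it.
def Pre_classRoster (students : List (String × List String)) : Prop :=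
  (students.map Prod.fst).Nodup

instance (students : List (String × List String)) : Decidable (Pre_classRoster students) := by
  unfold Pre_classRoster; infer_instance

def pvWitness_classRoster : (List (String × List String)) :=
  [("bob", ["cs", "math"]), ("amy", ["cs"])]

def Spec_classRoster (students : List (String × List String)) (out : List (String × List String)) : Prop := out = classRoster_alt students
instance (students : List (String × List String)) (out : List (String × List String)) : Decidable (Spec_classRoster students out) := by unfold Spec_classRoster; infer_instance

-- ===== CLAIM (what is proved, stated in full; the proofs are below) =====
def Claim_equal_classRoster : Prop := ∀ (students : List (String × List String)), Dom_classRoster students → Pre_classRoster students → Spec_classRoster students (classRoster students)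

-- ===== LEMMAS AND PROOFS =====

-- value dict abbreviation used by the proofs
abbrev SDict := PySem.Dict String (List String)

-- the common key order: first occurrence of each class across the students, in order
def pvKS (students : List (String × List String)) : PySem.Set String :=
  students.foldl (fun s p => PySem.Set.update s p.2) PySem.Set.empty

-- the common value: the students listing class c, in input order
def pvVal (students : List (String × List String)) (c : String) : List String :=
  (students.filter (fun p => p.2.contains c)).map Prod.fst

lemma pv_update_of_subset (xs : List String) :
    ∀ (s : PySem.Set String), (∀ x ∈ xs, x ∈ s) → PySem.Set.update s xs = s := by
  induction xs with
  | nil => intro s _; rfl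
  | cons x xs ih =>
    intro s h
    have hx : s.add x = s := PySem.Set.add_of_mem (h x (by simp))
    show PySem.Set.update (s.add x) xs = s
    rw [hx]
    exact ih s (fun y hy => h y (by simp [hy]))

lemma pv_update_add (s t : PySem.Set String) (x : String) :
    PySem.Set.update s (t.add x) = (PySem.Set.update s t).add x := by
  by_cases hx : x ∈ t
  · have h1 : t.add x = t := PySem.Set.add_of_mem hx
    have h2 : x ∈ PySem.Set.update s t := (PySem.Set.mem_update s t x).mpr (Or.inr hx)
    rw [h1, PySem.Set.add_of_mem h2]
  · have h1 : t.add x = t ++ [x] := by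
      simp only [PySem.Set.add]
      rw [if_neg (by simpa [List.contains_iff_mem] using hx)]
    rw [h1, PySem.Set.update_append]
    rfl

lemma pv_update_update (xs : List String) :
    ∀ (s t : PySem.Set String),
      PySem.Set.update s (PySem.Set.update t xs) = PySem.Set.update (PySem.Set.update s t) xs := by
  induction xs with
  | nil => intro s t; rfl
  | cons x xs ih =>
    intro s t
    show PySem.Set.update s (PySem.Set.update (t.add x) xs)
        = PySem.Set.update (PySem.Set.update s t) (x :: xs)
    rw [ih s (t.add x), pv_update_add]
    rfl

lemma pv_update_dedup (s : PySem.Set String) (xs : List String) :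
    PySem.Set.update s (PySem.List.dedup xs) = PySem.Set.update s xs := by
  have h : PySem.List.dedup xs = PySem.Set.update PySem.Set.empty xs := rfl
  rw [h, pv_update_update xs s PySem.Set.empty]
  rfl

lemma pv_nodup_foldl_update (l : List (String × List String)) :
    ∀ (s : PySem.Set String), s.Nodup →
      (l.foldl (fun s p => PySem.Set.update s p.2) s).Nodup := by
  induction l with
  | nil => intro s h; exact h
  | cons p l ih => intro s h; exact ih _ (PySem.Set.nodup_update s p.2 h)

lemma pv_nodup_KS (students : List (String × List String)) : (pvKS students).Nodup :=
  pv_nodup_foldl_update students PySem.Set.empty List.nodup_nil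

-- ===== A, first loop =====
lemma pv_A1_keys (l : List (List String)) :
    ∀ (d : SDict),
      (l.foldl (fun r v => v.foldl (fun r sub => r.insert sub []) r) d).keys
        = l.foldl (fun s v => PySem.Set.update s v) d.keys := by
  induction l with
  | nil => intro d; rfl
  | cons v l ih =>
    intro d
    show (l.foldl _ (v.foldl (fun r sub => r.insert sub []) d)).keys = _
    rw [ih, PySem.Dict.keys_foldl_insert v (fun _ _ => []) d]
    rfl

lemma pv_A1_getD_inner (v : List String) :
    ∀ (d : SDict), (∀ x, d.getD x [] = []) →
      ∀ x, (v.foldl (fun r sub => r.insert sub []) d).getD x [] = [] := by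
  induction v with
  | nil => intro d h x; exact h x
  | cons s v ih =>
    intro d h x
    refine ih _ (fun y => ?_) x
    rw [PySem.Dict.getD_insert]
    split_ifs <;> simp [h]

lemma pv_A1_getD (l : List (List String)) :
    ∀ (d : SDict), (∀ x, d.getD x [] = []) →
      ∀ x, (l.foldl (fun r v => v.foldl (fun r sub => r.insert sub []) r) d).getD x [] = [] := by
  induction l with
  | nil => intro d h x; exact h x
  | cons v l ih => intro d h x; exact ih _ (pv_A1_getD_inner v d h) x

-- ===== A, second loop =====
lemma pv_A2_inner_keys (K : List String) :
    ∀ (r : SDict) (cs : List String) (s : String), (∀ x ∈ K, r.contains x = true) →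
      (K.foldl (fun r2 x => if cs.contains x then r2.modify x [] (fun l => l ++ [s]) else r2) r).keys
        = r.keys := by
  induction K with
  | nil => intro r _ _ _; rfl
  | cons x K ih =>
    intro r cs s h
    show (K.foldl _ (if cs.contains x then r.modify x [] (fun l => l ++ [s]) else r)).keys = r.keys
    split_ifs with hc
    · have hkeys : (r.modify x [] (fun l => l ++ [s])).keys = r.keys := by
        rw [PySem.Dict.keys_modify, PySem.Dict.keys_insert_of_contains r _ (h x (by simp))]
      rw [ih _ cs s (fun y hy => by
        rw [PySem.Dict.contains_modify]
        simp [h y (by simp [hy])]), hkeys]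
    · exact ih r cs s (fun y hy => h y (by simp [hy]))

lemma pv_A2_inner_getD (K : List String) :
    ∀ (r : SDict) (cs : List String) (s c : String), K.Nodup →
      (K.foldl (fun r2 x => if cs.contains x then r2.modify x [] (fun l => l ++ [s]) else r2) r).getD c []
        = r.getD c [] ++ (if c ∈ K ∧ cs.contains c then [s] else []) := by
  induction K with
  | nil => intro r cs s c _; simp
  | cons x K ih =>
    intro r cs s c hnd
    have hndK : K.Nodup := hnd.of_cons
    rw [List.foldl_cons, ih _ cs s c hndK]
    by_cases hcx : c = x
    · subst hcx
      have hcK : c ∉ K := (List.nodup_cons.mp hnd).1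
      by_cases hc : cs.contains c = true
      · rw [if_pos hc, PySem.Dict.getD_modify_self,
          if_neg (show ¬(c ∈ K ∧ cs.contains c = true) from fun hh => hcK hh.1),
          if_pos (show c ∈ c :: K ∧ cs.contains c = true from ⟨by simp, hc⟩)]
        simp
      · rw [if_neg hc,
          if_neg (show ¬(c ∈ K ∧ cs.contains c = true) from fun hh => hc hh.2),
          if_neg (show ¬(c ∈ c :: K ∧ cs.contains c = true) from fun hh => hc hh.2)]
    · have hmem : (c ∈ x :: K ∧ cs.contains c = true) ↔ (c ∈ K ∧ cs.contains c = true) := by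
        simp [List.mem_cons, hcx]
      have hg : (if cs.contains x = true then r.modify x [] (fun l => l ++ [s]) else r).getD c []
          = r.getD c [] := by
        split_ifs
        · exact PySem.Dict.getD_modify_of_ne r [] _ hcx
        · rfl
      rw [hg]
      congr 1
      rw [if_congr hmem rfl rfl]

lemma pv_A2_loop (l : List (String × List String)) :
    ∀ (r : SDict), r.keys.Nodup →
      (l.foldl (fun r p =>
          r.keys.foldl (fun r2 x => if p.2.contains x then r2.modify x [] (fun l => l ++ [p.1]) else r2) r) r).keys
        = r.keys
      ∧ ∀ c ∈ r.keys,
          (l.foldl (fun r p =>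
              r.keys.foldl (fun r2 x => if p.2.contains x then r2.modify x [] (fun l => l ++ [p.1]) else r2) r) r).getD c []
            = r.getD c [] ++ (l.filter (fun p => p.2.contains c)).map Prod.fst := by
  induction l with
  | nil => intro r _; exact ⟨rfl, fun c _ => by simp⟩
  | cons p l ih =>
    intro r hnd
    have hcont : ∀ x ∈ r.keys, r.contains x = true :=
      fun x hx => (PySem.Dict.contains_iff_mem_keys r x).mpr hx
    have hk1 : (r.keys.foldl (fun r2 x => if p.2.contains x then r2.modify x [] (fun l => l ++ [p.1]) else r2) r).keys = r.keys :=
      pv_A2_inner_keys r.keys r p.2 p.1 hcont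
    have hnd1 : (r.keys.foldl (fun r2 x => if p.2.contains x then r2.modify x [] (fun l => l ++ [p.1]) else r2) r).keys.Nodup := by
      rw [hk1]; exact hnd
    obtain ⟨ihk, ihv⟩ := ih _ hnd1
    constructor
    · rw [List.foldl_cons, ihk, hk1]
    · intro c hc
      rw [List.foldl_cons, ihv c (by rw [hk1]; exact hc),
        pv_A2_inner_getD r.keys r p.2 p.1 c hnd, List.filter_cons]
      by_cases hcp : p.2.contains c = true
      · rw [if_pos (show c ∈ r.keys ∧ p.2.contains c = true from ⟨hc, hcp⟩), if_pos hcp]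
        simp
      · rw [if_neg (show ¬(c ∈ r.keys ∧ p.2.contains c = true) from fun hh => hcp hh.2), if_neg hcp]
        simp

-- ===== the shared final sorting loop =====
lemma pv_sort_keys (K : List String) :
    ∀ (r : SDict), (∀ x ∈ K, x ∈ r.keys) →
      (K.foldl (fun r x => r.modify x [] (fun l => PySem.List.sorted l id)) r).keys = r.keys := by
  intro r h
  rw [PySem.Dict.keys_foldl_modify K [] (fun _ _ => fun l => PySem.List.sorted l id) r]
  exact pv_update_of_subset K r.keys h

lemma pv_sort_getD (K : List String) :
    ∀ (r : SDict) (c : String), K.Nodup →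
      (K.foldl (fun r x => r.modify x [] (fun l => PySem.List.sorted l id)) r).getD c []
        = if c ∈ K then PySem.List.sorted (r.getD c []) id else r.getD c [] := by
  induction K with
  | nil => intro r c _; simp
  | cons x K ih =>
    intro r c hnd
    show (K.foldl _ (r.modify x [] (fun l => PySem.List.sorted l id))).getD c [] = _
    rw [ih _ c hnd.of_cons]
    by_cases hcx : c = x
    · subst hcx
      rw [if_neg ((List.nodup_cons.mp hnd).1), PySem.Dict.getD_modify_self, if_pos (by simp)]
    · rw [PySem.Dict.getD_modify_of_ne r [] _ hcx]
      by_cases hcK : c ∈ K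
      · rw [if_pos hcK, if_pos (by simp [hcK])]
      · rw [if_neg hcK, if_neg (by simp [hcx, hcK])]

-- ===== B, build loop =====
lemma pv_B_keys (l : List (String × List String)) :
    ∀ (d : SDict),
      (l.foldl (fun r p => (PySem.List.dedup p.2).foldl (fun r c => r.modify c [] (fun l => l ++ [p.1])) r) d).keys
        = l.foldl (fun s p => PySem.Set.update s p.2) d.keys := by
  induction l with
  | nil => intro d; rfl
  | cons p l ih =>
    intro d
    show (l.foldl _ ((PySem.List.dedup p.2).foldl (fun r c => r.modify c [] (fun l => l ++ [p.1])) d)).keys = _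
    rw [ih, PySem.Dict.keys_foldl_modify (PySem.List.dedup p.2) [] (fun _ _ => fun l => l ++ [p.1]) d,
      pv_update_dedup]
    rfl

lemma pv_filter_nodup (K : List String) (hnd : K.Nodup) (c : String) :
    K.filter (fun y => y == c) = if c ∈ K then [c] else [] := by
  induction K with
  | nil => simp
  | cons x K ih =>
    rw [List.filter_cons]
    by_cases hcx : x = c
    · subst hcx
      have hxK : x ∉ K := (List.nodup_cons.mp hnd).1
      simp [ih hnd.of_cons, hxK]
    · have hne : ¬ c = x := fun h => hcx h.symm
      rw [if_neg (show ¬((x == c) = true) from by simp [hcx]), ih hnd.of_cons,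
        if_congr (show c ∈ x :: K ↔ c ∈ K from by simp [List.mem_cons, hne]) rfl rfl]

lemma pv_B_inner_getD (cs : List String) (s : String) (d : SDict) (c : String) :
    ((PySem.List.dedup cs).foldl (fun r k => r.modify k [] (fun l => l ++ [s])) d).getD c []
      = d.getD c [] ++ (if cs.contains c then [s] else []) := by
  have h1 : ((PySem.List.dedup cs).foldl (fun r k => r.modify k [] (fun l => l ++ [s])) d)
      = (((PySem.List.dedup cs).map (fun k => (k, s))).foldl (fun r p => r.modify p.1 [] (fun l => l ++ [p.2])) d) := by
    rw [List.foldl_map]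
  rw [h1, PySem.Dict.getD_foldl_modify_append]
  congr 1
  have h4 : ((fun (p : String × String) => p.1 == c) ∘ (fun k => (k, s))) = (fun y => y == c) := by
    funext y; simp
  rw [List.filter_map, h4,
    pv_filter_nodup _ (PySem.List.nodup_dedup cs) c]
  have h3 : (c ∈ PySem.List.dedup cs) ↔ (cs.contains c = true) := by
    rw [PySem.List.mem_dedup, List.contains_iff_mem]
  rw [if_congr h3 rfl rfl]
  split_ifs <;> simp

lemma pv_B_loop_getD (l : List (String × List String)) :
    ∀ (d : SDict) (c : String),
      (l.foldl (fun r p => (PySem.List.dedup p.2).foldl (fun r c => r.modify c [] (fun l => l ++ [p.1])) r) d).getD c []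
        = d.getD c [] ++ (l.filter (fun p => p.2.contains c)).map Prod.fst := by
  induction l with
  | nil => intro d c; simp
  | cons p l ih =>
    intro d c
    show (l.foldl _ ((PySem.List.dedup p.2).foldl (fun r k => r.modify k [] (fun l => l ++ [p.1])) d)).getD c [] = _
    rw [ih, pv_B_inner_getD, List.filter_cons]
    split_ifs with hc <;> simp

-- ===== assembling the two sides =====
lemma pv_A2_bridge (students : List (String × List String)) (d : SDict) :
    ((PySem.List.pyRange 0 (PySem.List.len students)).foldl
      (fun r i =>
        r.keys.foldl
          (fun r2 x =>
            if (PySem.List.pyGetD (students.map Prod.snd) i []).contains x then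
              r2.modify x [] (fun l => l ++ [PySem.List.pyGetD (students.map Prod.fst) i ""])
            else r2) r) d)
    = students.foldl
        (fun r p => r.keys.foldl (fun r2 x => if p.2.contains x then r2.modify x [] (fun l => l ++ [p.1]) else r2) r)
        d := by
  have hfun : (fun (r : SDict) (i : Int) =>
        r.keys.foldl
          (fun r2 x =>
            if (PySem.List.pyGetD (students.map Prod.snd) i []).contains x then
              r2.modify x [] (fun l => l ++ [PySem.List.pyGetD (students.map Prod.fst) i ""])
            else r2) r)
      = (fun (r : SDict) (i : Int) =>
          (fun (r : SDict) (p : String × List String) =>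
            r.keys.foldl (fun r2 x => if p.2.contains x then r2.modify x [] (fun l => l ++ [p.1]) else r2) r)
          r (PySem.List.pyGetD students i ("", []))) := by
    funext r i
    rw [show PySem.List.pyGetD (students.map Prod.snd) i [] = (PySem.List.pyGetD students i ("", [])).2 from
        PySem.List.pyGetD_map Prod.snd students i ("", []),
      show PySem.List.pyGetD (students.map Prod.fst) i "" = (PySem.List.pyGetD students i ("", [])).1 from
        PySem.List.pyGetD_map Prod.fst students i ("", [])]
  rw [hfun]
  have h := PySem.List.foldl_pyRange_pyGetD students ("", [])
    (fun (r : SDict) (p : String × List String) =>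
      r.keys.foldl (fun r2 x => if p.2.contains x then r2.modify x [] (fun l => l ++ [p.1]) else r2) r)
    d (a := 0) le_rfl
  simpa using h

lemma pv_A_items (students : List (String × List String)) :
    classRoster students
      = (pvKS students).map (fun c => (c, PySem.List.sorted (pvVal students c) id)) := by
  simp only [classRoster]
  rw [pv_A2_bridge]
  set d0 : SDict :=
    (students.map Prod.snd).foldl (fun r v => v.foldl (fun r sub => r.insert sub []) r) PySem.Dict.empty with hd0
  have hk0 : d0.keys = pvKS students := by
    rw [hd0, pv_A1_keys, List.foldl_map]
    rfl
  have hnd0 : d0.keys.Nodup := by rw [hk0]; exact pv_nodup_KS students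
  have hg0 : ∀ x, d0.getD x [] = [] :=
    pv_A1_getD (students.map Prod.snd) PySem.Dict.empty (fun _ => rfl)
  set d1 : SDict :=
    students.foldl
      (fun r p => r.keys.foldl (fun r2 x => if p.2.contains x then r2.modify x [] (fun l => l ++ [p.1]) else r2) r)
      d0 with hd1
  obtain ⟨hk1, hv1⟩ := pv_A2_loop students d0 hnd0
  rw [← hd1] at hk1 hv1
  have hnd1 : d1.keys.Nodup := by rw [hk1]; exact hnd0
  set d2 : SDict := d1.keys.foldl (fun r x => r.modify x [] (fun l => PySem.List.sorted l id)) d1 with hd2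
  have hk2 : d2.keys = d1.keys := pv_sort_keys d1.keys d1 (fun x hx => hx)
  have hnd2 : d2.keys.Nodup := by rw [hk2]; exact hnd1
  rw [PySem.Dict.items_eq_map_keys d2 hnd2 [], hk2, hk1, hk0]
  refine List.map_congr_left (fun c hc => ?_)
  have hc1 : c ∈ d1.keys := by rw [hk1, hk0]; exact hc
  have hc0 : c ∈ d0.keys := by rw [hk0]; exact hc
  rw [hd2, pv_sort_getD d1.keys d1 c hnd1, if_pos hc1, hv1 c hc0, hg0 c]
  rfl

lemma pv_B_items (students : List (String × List String)) :
    classRoster_alt students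
      = (pvKS students).map (fun c => (c, PySem.List.sorted (pvVal students c) id)) := by
  simp only [classRoster_alt]
  set d1 : SDict :=
    students.foldl
      (fun r p => (PySem.List.dedup p.2).foldl (fun r c => r.modify c [] (fun l => l ++ [p.1])) r)
      PySem.Dict.empty with hd1
  have hk1 : d1.keys = pvKS students := by rw [hd1, pv_B_keys]; rfl
  have hnd1 : d1.keys.Nodup := by rw [hk1]; exact pv_nodup_KS students
  have hv1 : ∀ c, d1.getD c [] = pvVal students c := by
    intro c
    rw [hd1, pv_B_loop_getD]
    rfl
  set d2 : SDict := d1.keys.foldl (fun r c => r.modify c [] (fun l => PySem.List.sorted l id)) d1 with hd2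
  have hk2 : d2.keys = d1.keys := pv_sort_keys d1.keys d1 (fun x hx => hx)
  have hnd2 : d2.keys.Nodup := by rw [hk2]; exact hnd1
  rw [PySem.Dict.items_eq_map_keys d2 hnd2 [], hk2, hk1]
  refine List.map_congr_left (fun c hc => ?_)
  have hc1 : c ∈ d1.keys := by rw [hk1]; exact hc
  rw [hd2, pv_sort_getD d1.keys d1 c hnd1, if_pos hc1, hv1 c]

-- ===== VERDICT (by name: the statement is the Claim_ definition above) =====
theorem classRoster_spec : Claim_equal_classRoster := by
  intro students _ _
  show classRoster students = classRoster_alt students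
  rw [pv_A_items, pv_B_items]
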